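-- pv_equiv track=rewrite | github.com/Str1k3rFl0/AfiraV2 | documents_script/extract_context.py | rebuild_paragraphs
-- ===== SOURCE A (Python) =====
-- def rebuild_paragraphs(text):
--     lines = text.split("\n")
--     current = ""
--     paragraphs = []
--
--     for line in lines:
--         line = line.strip()
--         if not line:
--             if current:
--                 paragraphs.append(current.strip())
--                 current = ""
--             continue
--
--         if current.endswith("-"):
--             current = current[:-1] + line
--         else:
--             current += " " + line
--
--     if current:
--         paragraphs.append(current.strip())
--
--     return " ".join(paragraphs)
-- ===== SOURCE B (Python) =====
-- def rebuild_paragraphs(text):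
--     # Two-phase: group stripped lines into maximal non-blank blocks, then reduce
--     # each block with the hyphen-join rule; join the block paragraphs with spaces.
--     def merge(block):
--         acc = block[0]
--         for ln in block[1:]:
--             if acc.endswith("-"):
--                 acc = acc[:-1] + ln
--             else:
--                 acc = acc + " " + ln
--         return acc
--
--     lines = [ln.strip() for ln in text.split("\n")]
--     blocks = []
--     cur = []
--     for ln in lines:
--         if ln:
--             cur.append(ln)
--         elif cur:
--             blocks.append(cur)
--             cur = []
--     if cur:
--         blocks.append(cur)
--     return " ".join(merge(b) for b in blocks)
-- ===== Notes on version B (the rewrite author's own statement) =====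
-- stated objective: alternative
-- what changed: Replaces A's single interleaved loop with inline flushing of an accumulator string by a two-phase group-then-reduce: first group stripped lines into maximal non-blank blocks, then independently fold each block with the hyphen-join rule and join the per-block paragraphs.
import Mathlib
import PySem

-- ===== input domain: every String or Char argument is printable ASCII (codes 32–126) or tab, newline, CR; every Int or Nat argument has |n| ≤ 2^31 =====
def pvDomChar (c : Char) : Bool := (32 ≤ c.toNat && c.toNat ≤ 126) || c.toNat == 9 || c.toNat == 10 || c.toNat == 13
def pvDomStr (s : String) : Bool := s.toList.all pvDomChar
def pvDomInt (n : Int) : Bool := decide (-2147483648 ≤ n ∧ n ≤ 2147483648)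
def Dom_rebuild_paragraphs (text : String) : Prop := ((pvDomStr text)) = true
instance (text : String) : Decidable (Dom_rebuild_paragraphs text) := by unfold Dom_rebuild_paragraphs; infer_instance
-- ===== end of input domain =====

-- B rebuilds the paragraphs in two phases (group stripped lines into non-blank blocks, then
-- reduce each block with the hyphen-join rule) instead of A's single loop with inline flushing;
-- objective: alternative decomposition, same cost.

-- ===== PORT A =====
def rebuild_paragraphs (text : String) : String :=
  let lines := PySem.Chars.splitOn text.toList ['\n']
  let st := lines.foldl (fun (st : List Char × List (List Char)) line =>
      let line := PySem.Chars.strip line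
      if line = [] then
        (if st.1 ≠ [] then ([], st.2 ++ [PySem.Chars.strip st.1]) else st)
      else if PySem.Chars.endswith st.1 ['-'] then
        (PySem.List.slice st.1 none (some (-1)) ++ line, st.2)
      else
        (st.1 ++ ' ' :: line, st.2)) ([], [])
  let paragraphs := if st.1 ≠ [] then st.2 ++ [PySem.Chars.strip st.1] else st.2
  String.mk (PySem.Chars.join [' '] paragraphs)

-- ===== PORT B =====
-- merge(block) of Source B: fold block[1:] onto block[0] with the hyphen-join rule
def pvMergeB (block : List (List Char)) : List Char :=
  match block with
  | [] => []
  | b :: rest => rest.foldl (fun acc ln =>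
      if PySem.Chars.endswith acc ['-'] then PySem.List.slice acc none (some (-1)) ++ ln
      else acc ++ ' ' :: ln) b

def rebuild_paragraphs_alt (text : String) : String :=
  let lines := (PySem.Chars.splitOn text.toList ['\n']).map PySem.Chars.strip
  let st := lines.foldl (fun (st : List (List (List Char)) × List (List Char)) ln =>
      if ln ≠ [] then (st.1, st.2 ++ [ln])
      else if st.2 ≠ [] then (st.1 ++ [st.2], []) else st) ([], [])
  let blocks := if st.2 ≠ [] then st.1 ++ [st.2] else st.1
  String.mk (PySem.Chars.join [' '] (blocks.map pvMergeB))

-- ===== PRECONDITION & SPEC =====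
def Spec_rebuild_paragraphs (text : String) (out : String) : Prop := out = rebuild_paragraphs_alt text
instance (text : String) (out : String) : Decidable (Spec_rebuild_paragraphs text out) := by unfold Spec_rebuild_paragraphs; infer_instance

-- ===== CLAIM (what is proved, stated in full; the proofs are below) =====
def Claim_equal_rebuild_paragraphs : Prop := ∀ (text : String), Dom_rebuild_paragraphs text → Spec_rebuild_paragraphs text (rebuild_paragraphs text)

-- ===== LEMMAS AND PROOFS =====

-- a "good" line: its first and last characters (if any) are not whitespace
def GLine (l : List Char) : Prop :=
  (∀ c, l.head? = some c → PySem.Chars.isspace c = false) ∧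
  (∀ c, l.getLast? = some c → PySem.Chars.isspace c = false)

-- A's loop body, specialised to an already-stripped line
def pvStepA (st : List Char × List (List Char)) (line : List Char) : List Char × List (List Char) :=
  if line = [] then
    (if st.1 ≠ [] then ([], st.2 ++ [PySem.Chars.strip st.1]) else st)
  else if PySem.Chars.endswith st.1 ['-'] then
    (PySem.List.slice st.1 none (some (-1)) ++ line, st.2)
  else
    (st.1 ++ ' ' :: line, st.2)

-- B's grouping loop body
def pvStepB (st : List (List (List Char)) × List (List Char)) (ln : List Char) :
    List (List (List Char)) × List (List Char) :=
  if ln ≠ [] then (st.1, st.2 ++ [ln]) else if st.2 ≠ [] then (st.1 ++ [st.2], []) else st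

-- B's merge step
def pvStepM (acc ln : List Char) : List Char :=
  if PySem.Chars.endswith acc ['-'] then PySem.List.slice acc none (some (-1)) ++ ln
  else acc ++ ' ' :: ln

-- the abstraction relating B's state to A's state
def pvCurOf (cur : List (List Char)) : List Char :=
  if cur = [] then [] else ' ' :: pvMergeB cur

def pvToA (st : List (List (List Char)) × List (List Char)) : List Char × List (List Char) :=
  (pvCurOf st.2, st.1.map pvMergeB)

lemma slice_neg_one (l : List Char) : PySem.List.slice l none (some (-1)) = l.dropLast := by
  simp [PySem.List.slice, List.dropLast_eq_take]

lemma suffix_singleton_iff (l : List Char) (a : Char) : [a] <:+ l ↔ l.getLast? = some a := by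
  constructor
  · rintro ⟨t, rfl⟩; simp
  · intro h
    cases l.eq_nil_or_concat with
    | inl h' => subst h'; simp at h
    | inr h' => obtain ⟨t, b, rfl⟩ := h'; simp at h; subst h; exact ⟨t, by simp⟩

lemma endswith_eq_getLast (l : List Char) (a : Char) :
    PySem.Chars.endswith l [a] = (l.getLast? == some a) := by
  by_cases h : l.getLast? = some a
  · simp [h, (PySem.Chars.endswith_iff l [a]).2 ((suffix_singleton_iff l a).2 h)]
  · rcases hb : PySem.Chars.endswith l [a] with _ | _
    · simp [h]
    · exact absurd ((suffix_singleton_iff l a).1 ((PySem.Chars.endswith_iff l [a]).1 hb)) h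

lemma dropWhile_head_false (p : Char → Bool) :
    ∀ (l : List Char) (c : Char), (l.dropWhile p).head? = some c → p c = false := by
  intro l
  induction l with
  | nil => simp
  | cons a t ih =>
    intro c
    by_cases h : p a
    · simpa [List.dropWhile, h] using ih c
    · simp [List.dropWhile, h]; rintro rfl; simpa using h

lemma dropWhile_eq_self (p : Char → Bool) (l : List Char)
    (h : ∀ c, l.head? = some c → p c = false) : l.dropWhile p = l := by
  cases l with
  | nil => rfl
  | cons a t => simp [List.dropWhile, h a rfl]

lemma strip_good (s : List Char) : GLine (PySem.Chars.strip s) := by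
  constructor
  · intro c hc
    unfold PySem.Chars.strip PySem.Chars.rstrip PySem.Chars.lstrip at hc
    have hhead : ∀ d, (List.dropWhile PySem.Chars.isspace s).head? = some d →
        PySem.Chars.isspace d = false := fun d hd => dropWhile_head_false _ s d hd
    have hsuf : List.dropWhile PySem.Chars.isspace (List.dropWhile PySem.Chars.isspace s).reverse
        <:+ (List.dropWhile PySem.Chars.isspace s).reverse := List.dropWhile_suffix _
    have hpre : (List.dropWhile PySem.Chars.isspace
        (List.dropWhile PySem.Chars.isspace s).reverse).reverse
        <+: List.dropWhile PySem.Chars.isspace s := by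
      have := hsuf.reverse; simpa using this
    obtain ⟨t, ht⟩ := hpre
    apply hhead
    rw [← ht]
    rcases hy : (List.dropWhile PySem.Chars.isspace
        (List.dropWhile PySem.Chars.isspace s).reverse).reverse with _ | ⟨d, ds⟩
    · rw [hy] at hc; simp at hc
    · rw [hy] at hc
      simp only [List.head?_cons, Option.some.injEq] at hc
      subst hc
      simp
  · intro c hc
    unfold PySem.Chars.strip PySem.Chars.rstrip at hc
    rw [← List.head?_reverse, List.reverse_reverse] at hc
    exact dropWhile_head_false _ _ c hc

lemma strip_space_cons (acc : List Char) (hne : acc ≠ []) (hg : GLine acc) :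
    PySem.Chars.strip (' ' :: acc) = acc := by
  unfold PySem.Chars.strip PySem.Chars.lstrip PySem.Chars.rstrip
  have h1 : List.dropWhile PySem.Chars.isspace (' ' :: acc) = acc := by
    rw [List.dropWhile_cons_of_pos (by decide)]
    exact dropWhile_eq_self _ _ hg.1
  rw [h1]
  have h2 : List.dropWhile PySem.Chars.isspace acc.reverse = acc.reverse := by
    apply dropWhile_eq_self
    intro c hc
    exact hg.2 c (by rwa [List.head?_reverse] at hc)
  rw [h2, List.reverse_reverse]

-- pvMergeB over a block of nonempty good lines is nonempty and good
lemma dropLast_cons_of_ne (a : Char) (l : List Char) (h : l ≠ []) :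
    (a :: l).dropLast = a :: l.dropLast := by
  rcases l with _ | ⟨b, t⟩
  · exact absurd rfl h
  · rfl

lemma getLast?_cons_of_ne (a : Char) (l : List Char) (h : l ≠ []) :
    (a :: l).getLast? = l.getLast? := by
  rcases l with _ | ⟨b, t⟩
  · exact absurd rfl h
  · simp [List.getLast?_cons]

lemma getLast?_append_ne (l₁ l₂ : List Char) (h : l₂ ≠ []) :
    (l₁ ++ l₂).getLast? = l₂.getLast? := List.getLast?_append_of_ne_nil _ h

lemma stepM_good (acc ln : List Char) (ha : acc ≠ []) (hga : GLine acc)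
    (hl : ln ≠ []) (hgl : GLine ln) : pvStepM acc ln ≠ [] ∧ GLine (pvStepM acc ln) := by
  unfold pvStepM
  rw [slice_neg_one]
  split_ifs with h
  · refine ⟨by simp [hl], ?_, ?_⟩
    · intro c hc
      rcases acc with _ | ⟨a, t⟩
      · exact absurd rfl ha
      · rcases t with _ | ⟨b, u⟩
        · simp at hc; exact hgl.1 c hc
        · simp at hc; exact hga.1 c (by simp [hc])
    · intro c hc
      rw [getLast?_append_ne _ _ hl] at hc
      exact hgl.2 c hc
  · refine ⟨by simp, ?_, ?_⟩
    · intro c hc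
      rcases acc with _ | ⟨a, t⟩
      · exact absurd rfl ha
      · simp at hc; exact hga.1 c (by simp [hc])
    · intro c hc
      rw [getLast?_append_ne _ (' ' :: ln) (by simp),
        getLast?_cons_of_ne _ _ hl] at hc
      exact hgl.2 c hc

lemma mergeB_good : ∀ (rest : List (List Char)) (acc : List Char), acc ≠ [] → GLine acc →
    (∀ l ∈ rest, l ≠ [] ∧ GLine l) →
    rest.foldl pvStepM acc ≠ [] ∧ GLine (rest.foldl pvStepM acc) := by
  intro rest
  induction rest with
  | nil => intro acc ha hg _; exact ⟨ha, hg⟩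
  | cons l ls ih =>
    intro acc ha hg hrest
    have hl := hrest l (by simp)
    have := stepM_good acc l ha hg hl.1 hl.2
    exact ih _ this.1 this.2 (fun x hx => hrest x (by simp [hx]))

lemma mergeB_cons (b : List Char) (rest : List (List Char)) :
    pvMergeB (b :: rest) = rest.foldl pvStepM b := rfl

lemma mergeB_append_one (cur : List (List Char)) (hc : cur ≠ []) (ln : List Char) :
    pvMergeB (cur ++ [ln]) = pvStepM (pvMergeB cur) ln := by
  rcases cur with _ | ⟨b, rest⟩
  · exact absurd rfl hc
  · simp only [List.cons_append, mergeB_cons, List.foldl_append, List.foldl_cons, List.foldl_nil]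

-- pvMergeB of a nonempty block of nonempty good lines
lemma mergeB_good' (cur : List (List Char)) (hc : cur ≠ [])
    (h : ∀ b ∈ cur, b ≠ [] ∧ GLine b) : pvMergeB cur ≠ [] ∧ GLine (pvMergeB cur) := by
  rcases cur with _ | ⟨b, rest⟩
  · exact absurd rfl hc
  · rw [mergeB_cons]
    exact mergeB_good rest b (h b (by simp)).1 (h b (by simp)).2
      (fun x hx => h x (by simp [hx]))

-- the states stay related through one loop step
lemma step_commute (st : List (List (List Char)) × List (List Char)) (ln : List Char)
    (hln : GLine ln)
    (hcur : ∀ b ∈ st.2, b ≠ [] ∧ GLine b) :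
    pvStepA (pvToA st) ln = pvToA (pvStepB st ln) := by
  obtain ⟨blocks, cur⟩ := st
  by_cases h : ln = []
  · subst h
    unfold pvStepA pvStepB pvToA pvCurOf
    by_cases hc : cur = []
    · simp [hc]
    · have hm := mergeB_good' cur hc hcur
      simp [hc, strip_space_cons _ hm.1 hm.2]
  · by_cases hc : cur = []
    · subst hc
      unfold pvStepA pvStepB pvToA pvCurOf
      simp only [h, ite_false, if_neg, not_false_eq_true, ite_true, if_pos, ne_eq]
      simp [h, pvMergeB]
      intro hfalse
      exact absurd hfalse (by decide)
    · have hm := mergeB_good' cur hc hcur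
      have hend : PySem.Chars.endswith (' ' :: pvMergeB cur) ['-']
          = PySem.Chars.endswith (pvMergeB cur) ['-'] := by
        rw [endswith_eq_getLast, endswith_eq_getLast, getLast?_cons_of_ne _ _ hm.1]
      have hB : pvStepB (blocks, cur) ln = (blocks, cur ++ [ln]) := by
        unfold pvStepB; simp [h]
      have hA : pvToA (blocks, cur) = (' ' :: pvMergeB cur, blocks.map pvMergeB) := by
        unfold pvToA pvCurOf; simp [hc]
      rw [hB, hA]
      have hR : pvToA (blocks, cur ++ [ln]) = (' ' :: pvMergeB (cur ++ [ln]), blocks.map pvMergeB) := by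
        unfold pvToA pvCurOf
        simp [List.append_ne_nil_of_right_ne_nil _ (by simp : ([ln] : List (List Char)) ≠ [])]
      rw [hR, mergeB_append_one cur hc ln]
      unfold pvStepA pvStepM
      rw [hend]
      by_cases he : PySem.Chars.endswith (pvMergeB cur) ['-'] = true
      · simp only [h, ite_false, he, ite_true, if_pos, if_neg, not_false_eq_true]
        rw [slice_neg_one, slice_neg_one, dropLast_cons_of_ne _ _ hm.1]
        simp [h]
      · simp [h, he]

lemma stepB_inv (st : List (List (List Char)) × List (List Char)) (ln : List Char)
    (hln : GLine ln) (hcur : ∀ b ∈ st.2, b ≠ [] ∧ GLine b) :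
    ∀ b ∈ (pvStepB st ln).2, b ≠ [] ∧ GLine b := by
  unfold pvStepB
  split_ifs with h1 h2 <;> intro b hb
  · simp at hb
    rcases hb with hb | hb
    · exact hcur b hb
    · subst hb; exact ⟨h1, hln⟩
  · simp at hb
  · exact hcur b hb

lemma fold_commute : ∀ (ls : List (List Char)) (st : List (List (List Char)) × List (List Char)),
    (∀ l ∈ ls, GLine l) → (∀ b ∈ st.2, b ≠ [] ∧ GLine b) →
    ls.foldl pvStepA (pvToA st) = pvToA (ls.foldl pvStepB st)
      ∧ (∀ b ∈ (ls.foldl pvStepB st).2, b ≠ [] ∧ GLine b) := by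
  intro ls
  induction ls with
  | nil => intro st _ hcur; exact ⟨rfl, hcur⟩
  | cons l t ih =>
    intro st hls hcur
    have h1 := step_commute st l (hls l (by simp)) hcur
    have h2 := stepB_inv st l (hls l (by simp)) hcur
    have := ih (pvStepB st l) (fun x hx => hls x (by simp [hx])) h2
    simpa [h1] using this

-- ===== VERDICT (by name: the statement is the Claim_ definition above) =====
theorem rebuild_paragraphs_spec : Claim_equal_rebuild_paragraphs := by
  intro text _
  unfold Spec_rebuild_paragraphs rebuild_paragraphs rebuild_paragraphs_alt
  simp only []
  have hfoldA : (PySem.Chars.splitOn text.toList ['\n']).foldl (fun (st : List Char × List (List Char)) line =>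
      let line := PySem.Chars.strip line
      if line = [] then (if st.1 ≠ [] then ([], st.2 ++ [PySem.Chars.strip st.1]) else st)
      else if PySem.Chars.endswith st.1 ['-'] then (PySem.List.slice st.1 none (some (-1)) ++ line, st.2)
      else (st.1 ++ ' ' :: line, st.2)) ([], [])
      = ((PySem.Chars.splitOn text.toList ['\n']).map PySem.Chars.strip).foldl pvStepA ([], []) := by
    rw [List.foldl_map]
    rfl
  have hfoldB : ((PySem.Chars.splitOn text.toList ['\n']).map PySem.Chars.strip).foldl
      (fun (st : List (List (List Char)) × List (List Char)) ln =>
        if ln ≠ [] then (st.1, st.2 ++ [ln]) else if st.2 ≠ [] then (st.1 ++ [st.2], []) else st)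
      ([], [])
      = ((PySem.Chars.splitOn text.toList ['\n']).map PySem.Chars.strip).foldl pvStepB ([], []) := rfl
  rw [hfoldA, hfoldB]
  have hg : ∀ l ∈ (PySem.Chars.splitOn text.toList ['\n']).map PySem.Chars.strip, GLine l := by
    intro l hl
    obtain ⟨x, _, rfl⟩ := List.mem_map.1 hl
    exact strip_good x
  have hmain := fold_commute ((PySem.Chars.splitOn text.toList ['\n']).map PySem.Chars.strip)
    ([], []) hg (by simp)
  have h0 : pvToA ([], []) = (([] : List Char), ([] : List (List Char))) := rfl
  rw [h0] at hmain
  rw [hmain.1]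
  set stB := ((PySem.Chars.splitOn text.toList ['\n']).map PySem.Chars.strip).foldl pvStepB ([], []) with hstB
  have hinv := hmain.2
  by_cases hc : stB.2 = []
  · simp [pvToA, pvCurOf, hc]
  · have hm := mergeB_good' stB.2 hc hinv
    simp [pvToA, pvCurOf, hc, strip_space_cons _ hm.1 hm.2]
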